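-- pv_equiv track=rewrite | github.com/BingKeyelse/Project-Sort-blister_HN | module_connect_with_plc_now.py | send_D_bit
-- ===== SOURCE A (Python) =====
-- def send_D_bit(address, value):
--     # Sử dụng 2 byte để biểu diễn giá trị lớn hơn 256 nhưng nhỏ hơn 65535
--     lower_byte = value & 0xFF  # Lấy 8 bit thấp nhất (byte 1)
--     higher_byte = (value >> 8) & 0xFF  # Lấy 8 bit cao (byte 2)
--
--     # Khung dữ liệu gửi đi
--     frame = {
--         'header': [0x50, 0, 0, 0xff, 0xff, 3, 0],
--         'length': [0x10, 0],  # Độ dài sẽ cập nhật sau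
--         'timer': [0x20, 0],
--         'command': [1, 0x14],
--         'sub_command': [0, 0],
--         'start_addr': [address & 0xFF, (address >> 8) & 0xFF, (address >> 16) & 0xFF],  # Địa chỉ 3 byte
--         'device': [0xa8],
--         'points': [1, 0],  # Gửi 1 từ (2 byte)
--         'w_data': [lower_byte, higher_byte]  # 2 byte của giá trị cần gửi
--     }
--
--     # Kết hợp các phần của frame thành một khung dữ liệu hoàn chỉnh
--     dummy = []
--     for field in list(frame.values()):
--         dummy += field
--
--     # Cập nhật độ dài khung dữ liệu
--     frame_length = len(dummy) - 9
--     dummy[7] = frame_length & 0xFF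
--     dummy[8] = (frame_length >> 8) & 0xFF
--
--     return dummy
-- ===== SOURCE B (Python) =====
-- def send_D_bit(address, value):
--     # Constant-size frame: length field is always 23-9 = 14, so it is hard-coded
--     # as [14, 0]; only the address and value bytes vary.
--     return [0x50, 0, 0, 0xff, 0xff, 3, 0,
--             14, 0,
--             0x20, 0,
--             1, 0x14,
--             0, 0,
--             address & 0xFF, (address >> 8) & 0xFF, (address >> 16) & 0xFF,
--             0xa8,
--             1, 0,
--             value & 0xFF, (value >> 8) & 0xFF]
-- ===== Notes on version B (the rewrite author's own statement) =====
-- stated objective: simpler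
-- what changed: B returns one flat list literal with the constant length field precomputed as [14, 0], eliminating A's dict, its concatenation loop, and the after-the-fact length patch of indices 7 and 8.
import Mathlib
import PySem

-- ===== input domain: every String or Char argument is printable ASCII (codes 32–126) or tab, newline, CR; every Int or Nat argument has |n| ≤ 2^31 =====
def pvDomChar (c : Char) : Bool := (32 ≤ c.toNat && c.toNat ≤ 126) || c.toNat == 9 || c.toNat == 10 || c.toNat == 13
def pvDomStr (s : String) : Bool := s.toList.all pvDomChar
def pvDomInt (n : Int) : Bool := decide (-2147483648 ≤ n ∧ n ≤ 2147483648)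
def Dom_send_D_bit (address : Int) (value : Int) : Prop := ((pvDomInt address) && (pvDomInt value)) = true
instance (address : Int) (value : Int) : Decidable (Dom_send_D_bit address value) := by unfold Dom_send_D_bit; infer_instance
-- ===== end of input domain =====

-- B builds the constant-size frame as one flat list literal with the length field
-- precomputed as [14, 0], instead of A's dict + concatenation loop + length patch (objective: simpler).

-- ===== PORT A =====
def send_D_bit (address : Int) (value : Int) : List Int :=
  let lower_byte := PySem.Int.band value 255
  let higher_byte := PySem.Int.band (value >>> 8) 255
  -- Python dict literal with distinct keys: represented directly as a literal PySem.Dict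
  let frame : PySem.Dict String (List Int) := PySem.Dict.mk
    [("header", [0x50, 0, 0, 0xff, 0xff, 3, 0]),
     ("length", [0x10, 0]),
     ("timer", [0x20, 0]),
     ("command", [1, 0x14]),
     ("sub_command", [0, 0]),
     ("start_addr", [PySem.Int.band address 255, PySem.Int.band (address >>> 8) 255,
                     PySem.Int.band (address >>> 16) 255]),
     ("device", [0xa8]),
     ("points", [1, 0]),
     ("w_data", [lower_byte, higher_byte])]
  let dummy := frame.values.foldl (fun acc field => acc ++ field) []
  let frame_length : Int := (dummy.length : Int) - 9
  let dummy := dummy.set 7 (PySem.Int.band frame_length 255)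
  let dummy := dummy.set 8 (PySem.Int.band (frame_length >>> 8) 255)
  dummy

-- ===== PORT B =====
def send_D_bit_alt (address : Int) (value : Int) : List Int :=
  [0x50, 0, 0, 0xff, 0xff, 3, 0,
   14, 0,
   0x20, 0,
   1, 0x14,
   0, 0,
   PySem.Int.band address 255, PySem.Int.band (address >>> 8) 255, PySem.Int.band (address >>> 16) 255,
   0xa8,
   1, 0,
   PySem.Int.band value 255, PySem.Int.band (value >>> 8) 255]

-- ===== PRECONDITION & SPEC =====
def Spec_send_D_bit (address : Int) (value : Int) (out : List Int) : Prop := out = send_D_bit_alt address value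
instance (address : Int) (value : Int) (out : List Int) : Decidable (Spec_send_D_bit address value out) := by unfold Spec_send_D_bit; infer_instance

-- ===== CLAIM (what is proved, stated in full; the proofs are below) =====
def Claim_equal_send_D_bit : Prop := ∀ (address : Int) (value : Int), Dom_send_D_bit address value → Spec_send_D_bit address value (send_D_bit address value)

-- ===== LEMMAS AND PROOFS =====

-- ===== VERDICT (by name: the statement is the Claim_ definition above) =====
theorem send_D_bit_spec : Claim_equal_send_D_bit := by
  intro address value _
  unfold Spec_send_D_bit send_D_bit send_D_bit_alt
  simp [PySem.Dict.values, List.foldl, List.set]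
  exact ⟨by decide, by decide⟩
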